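-- pv_equiv track=rewrite | github.com/bhavyajain768/Contor-Tracing | vertex_following.py | nextClockwise
-- ===== SOURCE A (Python) =====
-- def nextClockwise(center,current,I,J):
--     time = 0
--     if(center[0]<current[0] and center[1]==current[1]):
--         time = time+1
--         ans = (center[0],center[1]-1)
--     elif(center[0]==current[0] and center[1]>current[1]):
--         time = time+2
--         ans = (center[0]-1,center[1])
--     elif(center[0]>current[0] and center[1]==current[1]):
--         time = time+3
--         ans = (center[0],center[1]+1)
--     else:
--         time = time+3
--         ans = (center[0]+1,center[1])
--
-- #A while loop for encountering corner cases
--     while(ans[0]<(-0.5) or ans[1]<(-0.5) or ans[0]>=I or ans[1]>=J):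
--         a = nextClockwise(center,ans,I,J)
--         ans = a[0]
--         time = time+a[1]
--     return (ans,time)
-- ===== SOURCE B (Python) =====
-- def nextClockwise(center, current, I, J):
--     # Data-driven: the answer always walks the fixed clockwise cycle of the four
--     # neighbors of center; pick the start from current's quadrant, then return the
--     # first in-bounds neighbor with the accumulated entry costs, no recursion.
--     cx, cy = center
--     cyc = [((cx, cy - 1), 1), ((cx - 1, cy), 2), ((cx, cy + 1), 3), ((cx + 1, cy), 3)]
--     if cx < current[0] and cy == current[1]:
--         k = 0
--     elif cx == current[0] and cy > current[1]:
--         k = 1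
--     elif cx > current[0] and cy == current[1]:
--         k = 2
--     else:
--         k = 3
--     time = 0
--     for (x, y), t in cyc[k:] + cyc[:k]:
--         time += t
--         if 0 <= x < I and 0 <= y < J:
--             return ((x, y), time)
--     raise ValueError("no in-bounds neighbor of center")
-- ===== Notes on version B (the rewrite author's own statement) =====
-- stated objective: alternative
-- what changed: Replaced A's recursion-inside-a-while by a data-driven bounded scan: the four neighbors of center with their entry costs are listed once in clockwise order, the start index is chosen from current's quadrant, and the first in-bounds entry of the rotated list is returned with the accumulated costs; Pre_ excludes the inputs where no neighbor of center is in bounds, on which A hits RecursionError (B raises ValueError there).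
import Mathlib
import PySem

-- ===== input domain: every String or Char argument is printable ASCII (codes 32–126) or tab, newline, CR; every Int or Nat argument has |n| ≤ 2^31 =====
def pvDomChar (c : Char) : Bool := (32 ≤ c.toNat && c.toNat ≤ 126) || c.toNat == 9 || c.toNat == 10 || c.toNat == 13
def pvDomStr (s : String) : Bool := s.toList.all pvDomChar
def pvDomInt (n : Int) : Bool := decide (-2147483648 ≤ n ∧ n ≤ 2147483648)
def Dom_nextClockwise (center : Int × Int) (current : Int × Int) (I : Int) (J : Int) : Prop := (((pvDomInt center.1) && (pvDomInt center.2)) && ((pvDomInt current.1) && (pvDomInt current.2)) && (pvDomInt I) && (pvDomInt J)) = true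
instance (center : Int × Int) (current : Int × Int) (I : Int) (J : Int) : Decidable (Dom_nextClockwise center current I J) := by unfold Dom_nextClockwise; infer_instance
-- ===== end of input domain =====

-- B replaces A's recursion-inside-a-while by a bounded scan over the precomputed clockwise neighbor cycle of center (alternative decomposition, same values).


-- ===== PORT A =====
-- Fuel makes the (in general non-terminating) recursion total; under Pre_ the
-- computation needs far fewer than 32 nested calls, so the fuel branch is never hit.
-- Python's `ans[0] < -0.5` on an Int is `ans.1 < 0` (exact for integers).
mutual
def nextClockwiseGo : Nat → (Int × Int) → (Int × Int) → Int → Int → (Int × Int) × Int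
  | 0, _, current, _, _ => (current, 0)
  | Nat.succ n, c, cur, I, J =>
    if c.1 < cur.1 ∧ c.2 = cur.2 then nextClockwiseWhile n c (c.1, c.2 - 1) 1 I J
    else if c.1 = cur.1 ∧ c.2 > cur.2 then nextClockwiseWhile n c (c.1 - 1, c.2) 2 I J
    else if c.1 > cur.1 ∧ c.2 = cur.2 then nextClockwiseWhile n c (c.1, c.2 + 1) 3 I J
    else nextClockwiseWhile n c (c.1 + 1, c.2) 3 I J

def nextClockwiseWhile : Nat → (Int × Int) → (Int × Int) → Int → Int → Int → (Int × Int) × Int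
  | 0, _, ans, time, _, _ => (ans, time)
  | Nat.succ n, c, ans, time, I, J =>
    if ans.1 < 0 ∨ ans.2 < 0 ∨ ans.1 ≥ I ∨ ans.2 ≥ J then
      let a := nextClockwiseGo n c ans I J
      nextClockwiseWhile n c a.1 (time + a.2) I J
    else (ans, time)
end

def nextClockwise (center : Int × Int) (current : Int × Int) (I : Int) (J : Int) : (Int × Int) × Int :=
  nextClockwiseGo 32 center current I J

-- ===== PORT B =====
-- the four grid vertices adjacent to center, in clockwise visiting order, with entry costs
def ncCycle (c : Int × Int) : List ((Int × Int) × Int) :=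
  [((c.1, c.2 - 1), 1), ((c.1 - 1, c.2), 2), ((c.1, c.2 + 1), 3), ((c.1 + 1, c.2), 3)]

-- start index in the cycle, from current's position relative to center
def ncStart (c p : Int × Int) : Nat :=
  if c.1 < p.1 ∧ c.2 = p.2 then 0
  else if c.1 = p.1 ∧ c.2 > p.2 then 1
  else if c.1 > p.1 ∧ c.2 = p.2 then 2
  else 3

-- the `for … return` scan; [] is Python's `raise ValueError` (unreachable under Pre_)
def ncScan : List ((Int × Int) × Int) → Int → Int → Int → (Int × Int) × Int
  | [], time, _, _ => ((0, 0), time)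
  | (p, t) :: rest, time, I, J =>
    if 0 ≤ p.1 ∧ p.1 < I ∧ 0 ≤ p.2 ∧ p.2 < J then (p, time + t)
    else ncScan rest (time + t) I J

def nextClockwise_alt (center : Int × Int) (current : Int × Int) (I : Int) (J : Int) : (Int × Int) × Int :=
  let k := ncStart center current
  let cyc := ncCycle center
  ncScan (cyc.drop k ++ cyc.take k) 0 I J

-- ===== PRECONDITION & SPEC =====
-- Pre_ excludes exactly the inputs on which no grid vertex adjacent to center lies in
-- [0,I)×[0,J): there A raises RecursionError and B raises ValueError.
def Pre_nextClockwise (center : Int × Int) (current : Int × Int) (I : Int) (J : Int) : Prop :=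
  (0 ≤ center.1 + 1 ∧ center.1 + 1 < I ∧ 0 ≤ center.2 ∧ center.2 < J) ∨
  (0 ≤ center.1 ∧ center.1 < I ∧ 0 ≤ center.2 - 1 ∧ center.2 - 1 < J) ∨
  (0 ≤ center.1 - 1 ∧ center.1 - 1 < I ∧ 0 ≤ center.2 ∧ center.2 < J) ∨
  (0 ≤ center.1 ∧ center.1 < I ∧ 0 ≤ center.2 + 1 ∧ center.2 + 1 < J)
instance (center : Int × Int) (current : Int × Int) (I : Int) (J : Int) : Decidable (Pre_nextClockwise center current I J) := by unfold Pre_nextClockwise; infer_instance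

def pvWitness_nextClockwise : (Int × Int) × (Int × Int) × Int × Int := ((0, 0), (1, 0), 2, 2)

def Spec_nextClockwise (center : Int × Int) (current : Int × Int) (I : Int) (J : Int) (out : (Int × Int) × Int) : Prop := out = nextClockwise_alt center current I J
instance (center : Int × Int) (current : Int × Int) (I : Int) (J : Int) (out : (Int × Int) × Int) : Decidable (Spec_nextClockwise center current I J out) := by unfold Spec_nextClockwise; infer_instance

-- ===== CLAIM (what is proved, stated in full; the proofs are below) =====
def Claim_equal_nextClockwise : Prop := ∀ (center : Int × Int) (current : Int × Int) (I : Int) (J : Int), Dom_nextClockwise center current I J → Pre_nextClockwise center current I J → Spec_nextClockwise center current I J (nextClockwise center current I J)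

-- ===== LEMMAS AND PROOFS =====

-- proof-only intermediate: A's recursion flattened into one step function plus a fueled loop
def ncStep (c : Int × Int) (p : Int × Int) : (Int × Int) × Int :=
  if c.1 < p.1 ∧ c.2 = p.2 then ((c.1, c.2 - 1), 1)
  else if c.1 = p.1 ∧ c.2 > p.2 then ((c.1 - 1, c.2), 2)
  else if c.1 > p.1 ∧ c.2 = p.2 then ((c.1, c.2 + 1), 3)
  else ((c.1 + 1, c.2), 3)

def ncLoop : Nat → (Int × Int) → (Int × Int) → Int → Int → Int → (Int × Int) × Int
  | 0, _, ans, time, _, _ => (ans, time)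
  | Nat.succ n, c, ans, time, I, J =>
    if ans.1 < 0 ∨ ans.2 < 0 ∨ ans.1 ≥ I ∨ ans.2 ≥ J then
      let a := ncStep c ans
      ncLoop n c a.1 (time + a.2) I J
    else (ans, time)

-- "out of bounds" test used by both loops
def ncOut (a : Int × Int) (I J : Int) : Prop := a.1 < 0 ∨ a.2 < 0 ∨ a.1 ≥ I ∨ a.2 ≥ J

-- res k c a I J: starting from a, iterating ncStep reaches an in-bounds point within k steps
def ncRes : Nat → (Int × Int) → (Int × Int) → Int → Int → Prop
  | 0, _, a, I, J => ¬ ncOut a I J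
  | Nat.succ k, c, a, I, J => ¬ ncOut a I J ∨ ncRes k c (ncStep c a).1 I J

lemma step_D (c : Int × Int) : ncStep c (c.1 + 1, c.2) = ((c.1, c.2 - 1), 1) := by
  unfold ncStep; split_ifs with h1 h2 _ <;> first | rfl | (exfalso; omega)

lemma step_L (c : Int × Int) : ncStep c (c.1, c.2 - 1) = ((c.1 - 1, c.2), 2) := by
  unfold ncStep; split_ifs with h1 h2 _ <;> first | rfl | (exfalso; omega)

lemma step_U (c : Int × Int) : ncStep c (c.1 - 1, c.2) = ((c.1, c.2 + 1), 3) := by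
  unfold ncStep; split_ifs with h1 h2 _ <;> first | rfl | (exfalso; omega)

lemma step_R (c : Int × Int) : ncStep c (c.1, c.2 + 1) = ((c.1 + 1, c.2), 3) := by
  unfold ncStep; split_ifs with h1 h2 _ <;> first | rfl | (exfalso; omega)

-- the first computed candidate is always one of the four neighbors of c
lemma step_mem (c p : Int × Int) :
    (ncStep c p).1 = (c.1, c.2 - 1) ∨ (ncStep c p).1 = (c.1 - 1, c.2) ∨
    (ncStep c p).1 = (c.1, c.2 + 1) ∨ (ncStep c p).1 = (c.1 + 1, c.2) := by
  unfold ncStep; split_ifs <;> simp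

-- A's inlined branch equals one ncStep followed by the while loop
lemma go_eq_step (n : Nat) (c a : Int × Int) (I J : Int) :
    nextClockwiseGo (n + 1) c a I J =
      nextClockwiseWhile n c (ncStep c a).1 (ncStep c a).2 I J := by
  show (if c.1 < a.1 ∧ c.2 = a.2 then nextClockwiseWhile n c (c.1, c.2 - 1) 1 I J
    else if c.1 = a.1 ∧ c.2 > a.2 then nextClockwiseWhile n c (c.1 - 1, c.2) 2 I J
    else if c.1 > a.1 ∧ c.2 = a.2 then nextClockwiseWhile n c (c.1, c.2 + 1) 3 I J
    else nextClockwiseWhile n c (c.1 + 1, c.2) 3 I J) = _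
  unfold ncStep; split_ifs <;> rfl

lemma ncLoop_stop (n : Nat) (c a : Int × Int) (t I J : Int) (h : ¬ ncOut a I J) :
    ncLoop n c a t I J = (a, t) := by
  cases n with
  | zero => rfl
  | succ n => unfold ncLoop; rw [if_neg]; exact h

lemma ncLoop_cont (n : Nat) (c a : Int × Int) (t I J : Int) (h : ncOut a I J) :
    ncLoop (n + 1) c a t I J = ncLoop n c (ncStep c a).1 (t + (ncStep c a).2) I J := by
  have h' : a.1 < 0 ∨ a.2 < 0 ∨ a.1 ≥ I ∨ a.2 ≥ J := h
  simp only [ncLoop, if_pos h']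

lemma while_stop (n : Nat) (c a : Int × Int) (t I J : Int) (h : ¬ ncOut a I J) :
    nextClockwiseWhile (n + 1) c a t I J = (a, t) := by
  unfold nextClockwiseWhile; rw [if_neg]; exact h

lemma while_cont (n : Nat) (c a : Int × Int) (t I J : Int) (h : ncOut a I J) :
    nextClockwiseWhile (n + 1) c a t I J =
      nextClockwiseWhile n c (nextClockwiseGo n c a I J).1
        (t + (nextClockwiseGo n c a I J).2) I J := by
  have h' : a.1 < 0 ∨ a.2 < 0 ∨ a.1 ≥ I ∨ a.2 ≥ J := h
  simp only [nextClockwiseWhile, if_pos h']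

-- core ncLoop facts: fuel beyond k is irrelevant, the result is in-bounds,
-- and time enters the result additively
lemma ncLoop_core (k : Nat) :
    ∀ (c a : Int × Int) (I J : Int), ncRes k c a I J → ∀ (m : Nat), k ≤ m → ∀ (t : Int),
      ncLoop m c a t I J = ncLoop k c a t I J ∧
      ¬ ncOut (ncLoop k c a t I J).1 I J ∧
      (ncLoop k c a t I J).1 = (ncLoop k c a 0 I J).1 ∧
      (ncLoop k c a t I J).2 = t + (ncLoop k c a 0 I J).2 := by
  induction k with
  | zero =>
    intro c a I J h m _ t
    rw [ncLoop_stop m c a t I J h, ncLoop_stop 0 c a t I J h, ncLoop_stop 0 c a 0 I J h]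
    exact ⟨rfl, h, rfl, by omega⟩
  | succ k ih =>
    intro c a I J h m hm t
    by_cases ho : ncOut a I J
    · have hres : ncRes k c (ncStep c a).1 I J := by
        cases h with
        | inl h => exact absurd ho h
        | inr h => exact h
      obtain ⟨m', rfl⟩ : ∃ m', m = m' + 1 := ⟨m - 1, by omega⟩
      have hu1 : ncLoop (m' + 1) c a t I J
          = ncLoop m' c (ncStep c a).1 (t + (ncStep c a).2) I J := ncLoop_cont m' c a t I J ho
      have hu2 : ∀ s : Int, ncLoop (k + 1) c a s I J
          = ncLoop k c (ncStep c a).1 (s + (ncStep c a).2) I J :=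
        fun s => ncLoop_cont k c a s I J ho
      obtain ⟨e1, e2, e3, e4⟩ := ih c (ncStep c a).1 I J hres m' (by omega) (t + (ncStep c a).2)
      obtain ⟨_, _, e3', e4'⟩ := ih c (ncStep c a).1 I J hres k (le_refl k) ((0:Int) + (ncStep c a).2)
      refine ⟨by rw [hu1, hu2, e1], ?_, ?_, ?_⟩
      · rw [hu2]; exact e2
      · rw [hu2, hu2, e3, e3']
      · rw [hu2, hu2, e4, e4']; omega
    · rw [ncLoop_stop m c a t I J ho, ncLoop_stop (k+1) c a t I J ho,
        ncLoop_stop (k+1) c a 0 I J ho]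
      exact ⟨rfl, ho, rfl, by omega⟩

-- A's while loop computes the same as the flat loop, given enough fuel
lemma while_eq_ncLoop (k : Nat) :
    ∀ (c a : Int × Int) (I J : Int), ncRes k c a I J → ∀ (n : Nat), 2 * k + 1 ≤ n → ∀ (t : Int),
      nextClockwiseWhile n c a t I J = ncLoop k c a t I J := by
  induction k with
  | zero =>
    intro c a I J h n hn t
    obtain ⟨n', rfl⟩ : ∃ n', n = n' + 1 := ⟨n - 1, by omega⟩
    rw [while_stop n' c a t I J h, ncLoop_stop 0 c a t I J h]
  | succ k ih =>
    intro c a I J h n hn t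
    by_cases ho : ncOut a I J
    · have hres : ncRes k c (ncStep c a).1 I J := by
        cases h with
        | inl h => exact absurd ho h
        | inr h => exact h
      obtain ⟨n'', rfl⟩ : ∃ n'', n = n'' + 2 := ⟨n - 2, by omega⟩
      have hgo : nextClockwiseGo (n'' + 1) c a I J
          = ncLoop k c (ncStep c a).1 (ncStep c a).2 I J := by
        rw [go_eq_step]; exact ih c (ncStep c a).1 I J hres n'' (by omega) _
      have hw : nextClockwiseWhile (n'' + 2) c a t I J
          = nextClockwiseWhile (n'' + 1) c (nextClockwiseGo (n'' + 1) c a I J).1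
              (t + (nextClockwiseGo (n'' + 1) c a I J).2) I J :=
        while_cont (n'' + 1) c a t I J ho
      obtain ⟨_, hin, h1, h2⟩ := ncLoop_core k c (ncStep c a).1 I J hres k (le_refl k) (ncStep c a).2
      obtain ⟨_, _, h1', h2'⟩ := ncLoop_core k c (ncStep c a).1 I J hres k (le_refl k) (t + (ncStep c a).2)
      rw [hw, hgo, while_stop _ _ _ _ _ _ hin]
      have hrhs : ncLoop (k + 1) c a t I J
          = ncLoop k c (ncStep c a).1 (t + (ncStep c a).2) I J := ncLoop_cont k c a t I J ho
      rw [hrhs]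
      apply Prod.ext
      · simp only [h1, h1']
      · simp only [h2, h2']; omega
    · obtain ⟨n', rfl⟩ : ∃ n', n = n' + 1 := ⟨n - 1, by omega⟩
      rw [while_stop n' c a t I J ho, ncLoop_stop (k+1) c a t I J ho]

-- under Pre_, any neighbor of c (hence any first candidate) resolves within 3 steps
lemma res_of_pre (c cur : Int × Int) (I J : Int)
    (h : Pre_nextClockwise c cur I J) (p : Int × Int) :
    ncRes 3 c (ncStep c p).1 I J := by
  have hD : ncRes 3 c (c.1 + 1, c.2) I J := by
    simp only [ncRes, step_D, step_L, step_U, ncOut, Pre_nextClockwise] at *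
    omega
  have hL : ncRes 3 c (c.1, c.2 - 1) I J := by
    simp only [ncRes, step_L, step_U, step_R, ncOut, Pre_nextClockwise] at *
    omega
  have hU : ncRes 3 c (c.1 - 1, c.2) I J := by
    simp only [ncRes, step_U, step_R, step_D, ncOut, Pre_nextClockwise] at *
    omega
  have hR : ncRes 3 c (c.1, c.2 + 1) I J := by
    simp only [ncRes, step_R, step_D, step_L, ncOut, Pre_nextClockwise] at *
    omega
  rcases step_mem c p with h' | h' | h' | h' <;> rw [h']
  · exact hL
  · exact hU
  · exact hR
  · exact hD

-- B's scan of the rotated cycle equals the flat loop started at the matching neighbor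
lemma scan0 (c cur : Int × Int) (I J t0 : Int) (h : Pre_nextClockwise c cur I J) :
    ncScan [((c.1, c.2 - 1), 1), ((c.1 - 1, c.2), 2), ((c.1, c.2 + 1), 3), ((c.1 + 1, c.2), 3)]
      t0 I J = ncLoop 3 c (c.1, c.2 - 1) (t0 + 1) I J := by
  simp only [Pre_nextClockwise] at h
  simp only [ncScan]
  by_cases hL : 0 ≤ c.1 ∧ c.1 < I ∧ 0 ≤ c.2 - 1 ∧ c.2 - 1 < J
  · rw [if_pos hL, ncLoop_stop _ _ _ _ _ _ (by simp only [ncOut]; omega)]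
  · rw [if_neg hL, ncLoop_cont 2 _ _ _ _ _ (by simp only [ncOut]; omega), step_L]
    by_cases hU : 0 ≤ c.1 - 1 ∧ c.1 - 1 < I ∧ 0 ≤ c.2 ∧ c.2 < J
    · rw [if_pos hU, ncLoop_stop _ _ _ _ _ _ (by simp only [ncOut]; omega)]
    · rw [if_neg hU, ncLoop_cont 1 _ _ _ _ _ (by simp only [ncOut]; omega), step_U]
      by_cases hR : 0 ≤ c.1 ∧ c.1 < I ∧ 0 ≤ c.2 + 1 ∧ c.2 + 1 < J
      · rw [if_pos hR, ncLoop_stop _ _ _ _ _ _ (by simp only [ncOut]; omega)]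
      · rw [if_neg hR, ncLoop_cont 0 _ _ _ _ _ (by simp only [ncOut]; omega), step_R]
        rw [if_pos (show 0 ≤ c.1 + 1 ∧ c.1 + 1 < I ∧ 0 ≤ c.2 ∧ c.2 < J by omega)]
        rfl

lemma scan1 (c cur : Int × Int) (I J t0 : Int) (h : Pre_nextClockwise c cur I J) :
    ncScan [((c.1 - 1, c.2), 2), ((c.1, c.2 + 1), 3), ((c.1 + 1, c.2), 3), ((c.1, c.2 - 1), 1)]
      t0 I J = ncLoop 3 c (c.1 - 1, c.2) (t0 + 2) I J := by
  simp only [Pre_nextClockwise] at h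
  simp only [ncScan]
  by_cases hU : 0 ≤ c.1 - 1 ∧ c.1 - 1 < I ∧ 0 ≤ c.2 ∧ c.2 < J
  · rw [if_pos hU, ncLoop_stop _ _ _ _ _ _ (by simp only [ncOut]; omega)]
  · rw [if_neg hU, ncLoop_cont 2 _ _ _ _ _ (by simp only [ncOut]; omega), step_U]
    by_cases hR : 0 ≤ c.1 ∧ c.1 < I ∧ 0 ≤ c.2 + 1 ∧ c.2 + 1 < J
    · rw [if_pos hR, ncLoop_stop _ _ _ _ _ _ (by simp only [ncOut]; omega)]
    · rw [if_neg hR, ncLoop_cont 1 _ _ _ _ _ (by simp only [ncOut]; omega), step_R]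
      by_cases hD : 0 ≤ c.1 + 1 ∧ c.1 + 1 < I ∧ 0 ≤ c.2 ∧ c.2 < J
      · rw [if_pos hD, ncLoop_stop _ _ _ _ _ _ (by simp only [ncOut]; omega)]
      · rw [if_neg hD, ncLoop_cont 0 _ _ _ _ _ (by simp only [ncOut]; omega), step_D]
        rw [if_pos (show 0 ≤ c.1 ∧ c.1 < I ∧ 0 ≤ c.2 - 1 ∧ c.2 - 1 < J by omega)]
        rfl

lemma scan2 (c cur : Int × Int) (I J t0 : Int) (h : Pre_nextClockwise c cur I J) :
    ncScan [((c.1, c.2 + 1), 3), ((c.1 + 1, c.2), 3), ((c.1, c.2 - 1), 1), ((c.1 - 1, c.2), 2)]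
      t0 I J = ncLoop 3 c (c.1, c.2 + 1) (t0 + 3) I J := by
  simp only [Pre_nextClockwise] at h
  simp only [ncScan]
  by_cases hR : 0 ≤ c.1 ∧ c.1 < I ∧ 0 ≤ c.2 + 1 ∧ c.2 + 1 < J
  · rw [if_pos hR, ncLoop_stop _ _ _ _ _ _ (by simp only [ncOut]; omega)]
  · rw [if_neg hR, ncLoop_cont 2 _ _ _ _ _ (by simp only [ncOut]; omega), step_R]
    by_cases hD : 0 ≤ c.1 + 1 ∧ c.1 + 1 < I ∧ 0 ≤ c.2 ∧ c.2 < J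
    · rw [if_pos hD, ncLoop_stop _ _ _ _ _ _ (by simp only [ncOut]; omega)]
    · rw [if_neg hD, ncLoop_cont 1 _ _ _ _ _ (by simp only [ncOut]; omega), step_D]
      by_cases hL : 0 ≤ c.1 ∧ c.1 < I ∧ 0 ≤ c.2 - 1 ∧ c.2 - 1 < J
      · rw [if_pos hL, ncLoop_stop _ _ _ _ _ _ (by simp only [ncOut]; omega)]
      · rw [if_neg hL, ncLoop_cont 0 _ _ _ _ _ (by simp only [ncOut]; omega), step_L]
        rw [if_pos (show 0 ≤ c.1 - 1 ∧ c.1 - 1 < I ∧ 0 ≤ c.2 ∧ c.2 < J by omega)]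
        rfl

lemma scan3 (c cur : Int × Int) (I J t0 : Int) (h : Pre_nextClockwise c cur I J) :
    ncScan [((c.1 + 1, c.2), 3), ((c.1, c.2 - 1), 1), ((c.1 - 1, c.2), 2), ((c.1, c.2 + 1), 3)]
      t0 I J = ncLoop 3 c (c.1 + 1, c.2) (t0 + 3) I J := by
  simp only [Pre_nextClockwise] at h
  simp only [ncScan]
  by_cases hD : 0 ≤ c.1 + 1 ∧ c.1 + 1 < I ∧ 0 ≤ c.2 ∧ c.2 < J
  · rw [if_pos hD, ncLoop_stop _ _ _ _ _ _ (by simp only [ncOut]; omega)]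
  · rw [if_neg hD, ncLoop_cont 2 _ _ _ _ _ (by simp only [ncOut]; omega), step_D]
    by_cases hL : 0 ≤ c.1 ∧ c.1 < I ∧ 0 ≤ c.2 - 1 ∧ c.2 - 1 < J
    · rw [if_pos hL, ncLoop_stop _ _ _ _ _ _ (by simp only [ncOut]; omega)]
    · rw [if_neg hL, ncLoop_cont 1 _ _ _ _ _ (by simp only [ncOut]; omega), step_L]
      by_cases hU : 0 ≤ c.1 - 1 ∧ c.1 - 1 < I ∧ 0 ≤ c.2 ∧ c.2 < J
      · rw [if_pos hU, ncLoop_stop _ _ _ _ _ _ (by simp only [ncOut]; omega)]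
      · rw [if_neg hU, ncLoop_cont 0 _ _ _ _ _ (by simp only [ncOut]; omega), step_U]
        rw [if_pos (show 0 ≤ c.1 ∧ c.1 < I ∧ 0 ≤ c.2 + 1 ∧ c.2 + 1 < J by omega)]
        rfl

-- ===== VERDICT (by name: the statement is the Claim_ definition above) =====
theorem nextClockwise_spec : Claim_equal_nextClockwise := by
  intro c cur I J _ hpre
  unfold Spec_nextClockwise nextClockwise nextClockwise_alt
  have hres := res_of_pre c cur I J hpre cur
  rw [show (32 : Nat) = 31 + 1 from rfl, go_eq_step]
  rw [while_eq_ncLoop 3 c (ncStep c cur).1 I J hres 31 (by omega)]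
  simp only [ncStart, ncStep, ncCycle]
  split_ifs with h1 h2 h3
  · simpa using (scan0 c cur I J 0 hpre).symm
  · simpa using (scan1 c cur I J 0 hpre).symm
  · simpa using (scan2 c cur I J 0 hpre).symm
  · simpa using (scan3 c cur I J 0 hpre).symm
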